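-- pv_equiv track=rewrite | github.com/h-sumeet/Data_Analytics_Assignment | Email_Validation/in_python/email.py | find_domain
-- ===== SOURCE A (Python) =====
-- def find_domain(email):
--     flag = False
--     domain = ""
--
--     for i in range(len(email)):
--         if flag:
--             domain += email[i]
--         if email[i] == '@':
--             flag = True
--
--     return domain
-- ===== SOURCE B (Python) =====
-- def find_domain(email):
--     pos = email.find('@')
--     return "" if pos == -1 else email[pos + 1:]
-- ===== Notes on version B (the rewrite author's own statement) =====
-- stated objective: simpler
-- what changed: Replaced the character-by-character scan with a flag and string accumulation by a single find('@') followed by one tail slice.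
import Mathlib
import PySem

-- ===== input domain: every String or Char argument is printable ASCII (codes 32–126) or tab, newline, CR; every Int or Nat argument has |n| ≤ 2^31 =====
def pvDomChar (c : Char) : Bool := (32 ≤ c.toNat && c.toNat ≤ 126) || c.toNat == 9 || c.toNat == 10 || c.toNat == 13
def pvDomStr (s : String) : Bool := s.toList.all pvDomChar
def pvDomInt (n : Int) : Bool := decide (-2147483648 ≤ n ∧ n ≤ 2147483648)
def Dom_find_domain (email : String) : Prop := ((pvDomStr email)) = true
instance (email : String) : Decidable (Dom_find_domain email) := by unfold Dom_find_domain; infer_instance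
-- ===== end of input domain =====

-- B replaces A's per-character scan with flag and accumulation by one find('@') plus one tail slice (simpler).

-- ===== PORT A =====
-- the loop body: append the char if the flag is set, then set the flag on '@'
def pvStepA (st : Bool × List Char) (c : Char) : Bool × List Char :=
  let st1 := if st.1 then (st.1, st.2 ++ [c]) else st
  if c = '@' then (true, st1.2) else st1

def find_domain (email : String) : String :=
  String.ofList (email.toList.foldl pvStepA (false, [])).2

-- ===== PORT B =====
def find_domain_alt (email : String) : String :=
  let pos := PySem.Str.find email "@"
  if pos = -1 then "" else PySem.Str.slice email (some (pos + 1)) none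

-- ===== PRECONDITION & SPEC =====
def Spec_find_domain (email : String) (out : String) : Prop := out = find_domain_alt email
instance (email : String) (out : String) : Decidable (Spec_find_domain email out) := by unfold Spec_find_domain; infer_instance

-- ===== CLAIM (what is proved, stated in full; the proofs are below) =====
def Claim_equal_find_domain : Prop := ∀ (email : String), Dom_find_domain email → Spec_find_domain email (find_domain email)

-- ===== LEMMAS AND PROOFS =====

-- the characterisation of A's loop: everything after the first '@'
def pvAfter : List Char → List Char
  | [] => []
  | c :: cs => if c = '@' then cs else pvAfter cs

theorem pvFoldTrue (l acc : List Char) : (l.foldl pvStepA (true, acc)).2 = acc ++ l := by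
  induction l generalizing acc with
  | nil => simp
  | cons c cs ih => simp [pvStepA, ih]

theorem pvFoldFalse (l : List Char) : (l.foldl pvStepA (false, [])).2 = pvAfter l := by
  induction l with
  | nil => simp [pvAfter]
  | cons c cs ih =>
    by_cases h : c = '@'
    · simp [pvStepA, pvAfter, h, pvFoldTrue]
    · simp [pvStepA, pvAfter, h, ih]

theorem pvAfter_of_not_mem (l : List Char) (h : '@' ∉ l) : pvAfter l = [] := by
  induction l with
  | nil => rfl
  | cons c cs ih =>
    simp only [List.mem_cons, not_or] at h
    have hc : c ≠ '@' := fun hc => h.1 hc.symm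
    simp [pvAfter, hc, ih h.2]

theorem pvAfter_drop (l : List Char) (n : Nat)
    (hp : ['@'] <+: l.drop n) (hm : ∀ i < n, ¬ ['@'] <+: l.drop i) :
    pvAfter l = l.drop (n + 1) := by
  induction l generalizing n with
  | nil => simp at hp
  | cons c cs ih =>
    by_cases h : c = '@'
    · have hn : n = 0 := by
        by_contra hn0
        exact hm 0 (Nat.pos_of_ne_zero hn0) (by simp [h])
      subst hn; simp [pvAfter, h]
    · cases n with
      | zero =>
        exfalso
        rcases hp with ⟨t, ht⟩
        simp at ht
        exact h ht.1.symm
      | succ m =>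
        have := ih m (by simpa using hp) (fun i hi => by simpa using hm (i + 1) (by omega))
        simp [pvAfter, h, this]

theorem find_domain_spec : Claim_equal_find_domain := by
  intro email _
  unfold Spec_find_domain find_domain find_domain_alt
  simp only [pvFoldFalse]
  by_cases h : PySem.Str.find email "@" = -1
  · have hmem : '@' ∉ email.toList := by
      have h2 := (PySem.Str.find_eq_neg_one_iff (s := email) (sub := "@")).mp h
      intro hc
      obtain ⟨s1, t1, heq⟩ := List.append_of_mem hc
      exact h2 ⟨s1, t1, by simpa using heq.symm⟩
    rw [pvAfter_of_not_mem _ hmem]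
    simp only [PySem.Str.find_eq] at h
    have h' : PySem.Chars.find email.toList ['@'] = -1 := h
    simp [h']
  · simp only [PySem.Str.find_eq] at h
    have h' : PySem.Chars.find email.toList ['@'] ≠ -1 := h
    have h0 : 0 ≤ PySem.Chars.find email.toList ['@'] := by
      have := PySem.Chars.neg_one_le_find (s := email.toList) (sub := ['@'])
      omega
    obtain ⟨hp, hmin⟩ := PySem.Chars.find_spec (s := email.toList) (sub := ['@']) h0
    have hafter := pvAfter_drop email.toList
      (PySem.Chars.find email.toList ['@']).toNat hp hmin
    simp only [PySem.Str.find_eq, show "@".toList = ['@'] from rfl]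
    rw [hafter, if_neg h']
    simp only [PySem.Str.slice]
    simp only [PySem.Chars.slice]
    rw [show PySem.Chars.find email.toList ['@'] + 1 =
        (((PySem.Chars.find email.toList ['@']).toNat + 1 : Nat) : Int) from by omega,
      PySem.List.slice_from_natCast]
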